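-- pv_equiv track=rewrite | github.com/cirpa-acpri/UBC-PAIR-SurveyTextAnalysis | pair_text_analysis/senti/sentiAnalysis.py | getSentiPhrase_allpos
-- ===== SOURCE A (Python) =====
-- def getSentiPhrase_allpos(lst):
--
--     usefulPhrases = []
--     searchBreadth = 1
--     dictOfPhrases = { i : lst[i] for i in range(0, len(lst)) }
--
--     ndict = {}
--     jdict = {}
--     vdict = {}
--     rdict = {}
--
--     for key, val in dictOfPhrases.items():
--
--         # get the pos for the word processed
--         pos = val[1]
--
--         if pos.startswith('J'):
--             jdict[key] = val
--         elif pos.startswith('V'):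
--             vdict[key] = val
--         elif pos.startswith('N'):
--             ndict[key] = val
--         elif pos.startswith('R'):
--             rdict[key] = val
--
--     # get pattern JJ<-searchbreadth->NN
--     for knoun, vnoun in ndict.items():
--         phrase = ""
--         for b in range(1, searchBreadth + 1):
--             if int(knoun - b) in jdict: # look for the adjective before and after the noun
--                 phrase = (jdict[knoun - b][0], ndict[knoun][0])
--             elif int(knoun + b) in jdict:
--                 phrase = (jdict[knoun + b][0], ndict[knoun][0])
--
--             if phrase != "":
--                 usefulPhrases.append(phrase)
--                 break
--
--     # get pattern RB VB
--     for kverb, vverb in vdict.items():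
--         phrase = ""
--         for b in range(1, searchBreadth + 1):
--             # look for the adverb before the verb as per https://arxiv.org/ftp/cs/papers/0212/0212032.pdf - page 2
--             if int(kverb - b) in rdict:
--                 phrase = (rdict[kverb - b][0], vdict[kverb][0])
--
--             if phrase != "":
--                 usefulPhrases.append(phrase)
--                 break
--
--     # get pattern RB JJ
--     for kadj, vadj in jdict.items():
--         phrase = ""
--         for b in range(1, 2):
--             # look for the adverb before the adjetive
--             if int(kadj - b) in rdict:
--                 phrase = (rdict[kadj - b][0], jdict[kadj][0])
--
--             if phrase != "":
--                 usefulPhrases.append(phrase)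
--                 break
--
--     # get pattern VB JJ
--     for kadj, vadj in jdict.items():
--         phrase = ""
--         for b in range(1, 2):
--             # look for the verb before the adjetive
--             if int(kadj - b) in vdict:
--                 phrase = (vdict[kadj - b][0], jdict[kadj][0])
-- #                 print (phrase)
--
--             if phrase != "":
--                 usefulPhrases.append(phrase)
--                 break
--
--     return usefulPhrases
-- ===== SOURCE B (Python) =====
-- def getSentiPhrase_allpos(lst):
--     n = len(lst)
--
--     def starts(i, c):
--         return 0 <= i < n and lst[i][1].startswith(c)
--
--     # noun pattern: adjective just before the noun, else just after
--     nouns = []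
--     for i in range(n):
--         if starts(i, 'N'):
--             if starts(i - 1, 'J'):
--                 nouns.append((lst[i - 1][0], lst[i][0]))
--             elif starts(i + 1, 'J'):
--                 nouns.append((lst[i + 1][0], lst[i][0]))
--
--     # generic "tag a immediately before tag b" pattern
--     def pairs(a, b):
--         return [(lst[i - 1][0], lst[i][0])
--                 for i in range(n) if starts(i, b) and starts(i - 1, a)]
--
--     return nouns + pairs('R', 'V') + pairs('R', 'J') + pairs('V', 'J')
-- ===== Notes on version B (the rewrite author's own statement) =====
-- stated objective: simpler
-- what changed: Replaces the five index-keyed dicts (dictOfPhrases plus one per POS class) and the breadth-search loops with four direct positional scans of the list that test neighbouring tags in place.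
import Mathlib
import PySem

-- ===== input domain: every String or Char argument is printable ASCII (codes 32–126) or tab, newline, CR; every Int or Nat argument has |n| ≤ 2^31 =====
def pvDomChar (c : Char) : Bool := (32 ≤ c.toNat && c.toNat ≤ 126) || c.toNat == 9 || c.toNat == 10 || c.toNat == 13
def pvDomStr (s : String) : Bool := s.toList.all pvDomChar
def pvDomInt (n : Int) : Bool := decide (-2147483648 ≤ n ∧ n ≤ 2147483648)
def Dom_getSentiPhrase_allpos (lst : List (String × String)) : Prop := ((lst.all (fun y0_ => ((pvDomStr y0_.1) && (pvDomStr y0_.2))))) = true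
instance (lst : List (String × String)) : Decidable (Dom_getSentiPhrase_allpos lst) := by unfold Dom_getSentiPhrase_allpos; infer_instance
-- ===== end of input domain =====

-- B drops A's five index-keyed dicts and scans the list positionally instead; same output, simpler code.

-- ===== PORT A =====
-- A's inner 'for b in range(1, …): … if phrase != "": append; break' loop: phrase starts
-- as "" and, once set to a tuple, the loop breaks immediately; so the loop's net effect is
-- the first `some` produced along the breadth list (none = phrase stayed "").
def pvTryB (f : Int → Option (String × String)) : List Int → Option (String × String)
  | [] => none
  | b :: bs =>
    match f b with
    | some p => some p
    | none => pvTryB f bs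

-- 'if phrase != "": usefulPhrases.append(phrase)'
def pvAppendOpt (acc : List (String × String)) (o : Option (String × String)) :
    List (String × String) :=
  match o with
  | some p => acc ++ [p]
  | none => acc

-- 'dictOfPhrases = { i : lst[i] for i in range(0, len(lst)) }'; the index i is always in
-- range here, so pyGetD's default is never used.
def pvDictOfPhrases (lst : List (String × String)) : PySem.Dict Int (String × String) :=
  (PySem.List.pyRange 0 lst.length 1).foldl
    (fun d i => d.insert i (PySem.List.pyGetD lst i ("", ""))) PySem.Dict.empty

-- the classification loop over dictOfPhrases.items() building jdict/vdict/ndict/rdict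
def pvClassify (lst : List (String × String)) :
    PySem.Dict Int (String × String) × PySem.Dict Int (String × String) ×
    PySem.Dict Int (String × String) × PySem.Dict Int (String × String) :=
  (pvDictOfPhrases lst).items.foldl
    (fun s kv =>
      let pos := kv.2.2
      if PySem.Str.startswith pos "J" then (s.1.insert kv.1 kv.2, s.2.1, s.2.2.1, s.2.2.2)
      else if PySem.Str.startswith pos "V" then (s.1, s.2.1.insert kv.1 kv.2, s.2.2.1, s.2.2.2)
      else if PySem.Str.startswith pos "N" then (s.1, s.2.1, s.2.2.1.insert kv.1 kv.2, s.2.2.2)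
      else if PySem.Str.startswith pos "R" then (s.1, s.2.1, s.2.2.1, s.2.2.2.insert kv.1 kv.2)
      else s)
    (PySem.Dict.empty, PySem.Dict.empty, PySem.Dict.empty, PySem.Dict.empty)

-- the JJ<->NN loop: 'for knoun, vnoun in ndict.items()'
def pvPass1 (jdict ndict : PySem.Dict Int (String × String)) (bs : List Int)
    (acc : List (String × String)) : List (String × String) :=
  ndict.items.foldl (fun acc kv =>
    pvAppendOpt acc (pvTryB (fun b =>
        if jdict.contains (kv.1 - b) then
          some ((jdict.getD (kv.1 - b) ("", "")).1, (ndict.getD kv.1 ("", "")).1)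
        else if jdict.contains (kv.1 + b) then
          some ((jdict.getD (kv.1 + b) ("", "")).1, (ndict.getD kv.1 ("", "")).1)
        else none) bs)) acc

-- A's last three loops (RB VB, RB JJ, VB JJ) are textually identical up to which dict is
-- looked back into and which dict is iterated; one helper, instantiated three times.
def pvPassPrev (look base : PySem.Dict Int (String × String)) (bs : List Int)
    (acc : List (String × String)) : List (String × String) :=
  base.items.foldl (fun acc kv =>
    pvAppendOpt acc (pvTryB (fun b =>
        if look.contains (kv.1 - b) then
          some ((look.getD (kv.1 - b) ("", "")).1, (base.getD kv.1 ("", "")).1)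
        else none) bs)) acc

def getSentiPhrase_allpos (lst : List (String × String)) : List (String × String) :=
  let searchBreadth : Int := 1
  let cls := pvClassify lst
  let jdict := cls.1
  let vdict := cls.2.1
  let ndict := cls.2.2.1
  let rdict := cls.2.2.2
  let up1 := pvPass1 jdict ndict (PySem.List.pyRange 1 (searchBreadth + 1) 1) []
  let up2 := pvPassPrev rdict vdict (PySem.List.pyRange 1 (searchBreadth + 1) 1) up1
  let up3 := pvPassPrev rdict jdict (PySem.List.pyRange 1 2 1) up2
  let up4 := pvPassPrev vdict jdict (PySem.List.pyRange 1 2 1) up3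
  up4

-- ===== PORT B =====
def pvAt (lst : List (String × String)) (i : Int) : String × String :=
  PySem.List.pyGetD lst i ("", "")

-- Source B's 'starts(i, c)': '0 <= i < n and lst[i][1].startswith(c)'
def pvStarts (lst : List (String × String)) (i : Int) (c : String) : Bool :=
  decide (0 ≤ i) && decide (i < (lst.length : Int)) && PySem.Str.startswith (pvAt lst i).2 c

-- Source B's 'pairs(a, b)' list comprehension
def pvPairs (lst : List (String × String)) (a b : String) : List (String × String) :=
  (PySem.List.pyRange 0 lst.length 1).filterMap (fun i =>
    if pvStarts lst i b && pvStarts lst (i - 1) a then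
      some ((pvAt lst (i - 1)).1, (pvAt lst i).1)
    else none)

def getSentiPhrase_allpos_alt (lst : List (String × String)) : List (String × String) :=
  let nouns := (PySem.List.pyRange 0 lst.length 1).foldl (fun acc i =>
      if pvStarts lst i "N" then
        if pvStarts lst (i - 1) "J" then acc ++ [((pvAt lst (i - 1)).1, (pvAt lst i).1)]
        else if pvStarts lst (i + 1) "J" then acc ++ [((pvAt lst (i + 1)).1, (pvAt lst i).1)]
        else acc
      else acc) []
  nouns ++ pvPairs lst "R" "V" ++ pvPairs lst "R" "J" ++ pvPairs lst "V" "J"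

-- ===== PRECONDITION & SPEC =====
def Spec_getSentiPhrase_allpos (lst : List (String × String)) (out : List (String × String)) : Prop := out = getSentiPhrase_allpos_alt lst
instance (lst : List (String × String)) (out : List (String × String)) : Decidable (Spec_getSentiPhrase_allpos lst out) := by unfold Spec_getSentiPhrase_allpos; infer_instance

-- ===== CLAIM (what is proved, stated in full; the proofs are below) =====
def Claim_equal_getSentiPhrase_allpos : Prop := ∀ (lst : List (String × String)), Dom_getSentiPhrase_allpos lst → Spec_getSentiPhrase_allpos lst (getSentiPhrase_allpos lst)

-- ===== LEMMAS AND PROOFS =====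

-- proof-side abbreviations
def pvF (lst : List (String × String)) (i : Int) : Int × (String × String) := (i, pvAt lst i)

def pvD (lst : List (String × String)) (c : Int × (String × String) → Bool) :
    PySem.Dict Int (String × String) :=
  (((PySem.List.pyRange 0 lst.length 1).map (pvF lst)).filter c).foldl
    (fun d kv => d.insert kv.1 kv.2) PySem.Dict.empty

def pvTag (t : String) (kv : Int × (String × String)) : Bool := PySem.Str.startswith kv.2.2 t
def pvCV (kv : Int × (String × String)) : Bool := !pvTag "J" kv && pvTag "V" kv
def pvCN (kv : Int × (String × String)) : Bool := !pvTag "J" kv && !pvTag "V" kv && pvTag "N" kv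
def pvCR (kv : Int × (String × String)) : Bool :=
  !pvTag "J" kv && !pvTag "V" kv && !pvTag "N" kv && pvTag "R" kv

lemma pvTryB_singleton (g : Int → Option (String × String)) (b : Int) :
    pvTryB g [b] = g b := by
  cases h : g b <;> simp [pvTryB, h]

lemma pvAppendOpt_none (acc : List (String × String)) : pvAppendOpt acc none = acc := rfl
lemma pvAppendOpt_some (acc : List (String × String)) (p : String × String) :
    pvAppendOpt acc (some p) = acc ++ [p] := rfl

lemma pvFoldlOptAppend {α : Type} (h : α → Option (String × String)) (l : List α)
    (acc : List (String × String)) :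
    l.foldl (fun acc kv => pvAppendOpt acc (h kv)) acc = acc ++ l.filterMap h := by
  induction l generalizing acc with
  | nil => simp
  | cons x xs ih =>
    cases hx : h x <;> simp [pvAppendOpt_none, pvAppendOpt_some, hx, ih]

lemma pvDictOfPhrases_items (lst : List (String × String)) :
    (pvDictOfPhrases lst).items = (PySem.List.pyRange 0 lst.length 1).map (pvF lst) := by
  unfold pvDictOfPhrases
  rw [PySem.Dict.items_foldl_insert_fresh (PySem.List.pyRange 0 lst.length 1) (fun i => i)
        (fun i => PySem.List.pyGetD lst i ("", "")) PySem.Dict.empty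
        (fun a _ => by simp [PySem.Dict.contains_empty])
        (by simpa using PySem.List.nodup_pyRange_one 0 (lst.length : Int))]
  rfl

lemma pvClassify_aux (l : List (Int × (String × String)))
    (dj dv dn dr : PySem.Dict Int (String × String)) :
    l.foldl
      (fun s kv =>
        let pos := kv.2.2
        if PySem.Str.startswith pos "J" then (s.1.insert kv.1 kv.2, s.2.1, s.2.2.1, s.2.2.2)
        else if PySem.Str.startswith pos "V" then (s.1, s.2.1.insert kv.1 kv.2, s.2.2.1, s.2.2.2)
        else if PySem.Str.startswith pos "N" then (s.1, s.2.1, s.2.2.1.insert kv.1 kv.2, s.2.2.2)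
        else if PySem.Str.startswith pos "R" then (s.1, s.2.1, s.2.2.1, s.2.2.2.insert kv.1 kv.2)
        else s)
      (dj, dv, dn, dr)
    = ((l.filter (pvTag "J")).foldl (fun d kv => d.insert kv.1 kv.2) dj,
       (l.filter pvCV).foldl (fun d kv => d.insert kv.1 kv.2) dv,
       (l.filter pvCN).foldl (fun d kv => d.insert kv.1 kv.2) dn,
       (l.filter pvCR).foldl (fun d kv => d.insert kv.1 kv.2) dr) := by
  induction l generalizing dj dv dn dr with
  | nil => simp
  | cons kv t ih =>
    simp only [List.foldl_cons, List.filter_cons]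
    by_cases hJ : PySem.Chars.startswith kv.2.2.toList ['J'] = true <;>
    by_cases hV : PySem.Chars.startswith kv.2.2.toList ['V'] = true <;>
    by_cases hN : PySem.Chars.startswith kv.2.2.toList ['N'] = true <;>
    by_cases hR : PySem.Chars.startswith kv.2.2.toList ['R'] = true <;>
      simp [pvTag, pvCV, pvCN, pvCR, hJ, hV, hN, hR] <;>
      exact ih _ _ _ _

lemma pvClassify_eq (lst : List (String × String)) :
    pvClassify lst = (pvD lst (pvTag "J"), pvD lst pvCV, pvD lst pvCN, pvD lst pvCR) := by
  unfold pvClassify pvD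
  rw [pvDictOfPhrases_items]
  exact pvClassify_aux _ _ _ _ _

lemma pvD_items (lst : List (String × String)) (c : Int × (String × String) → Bool) :
    (pvD lst c).items
      = ((PySem.List.pyRange 0 lst.length 1).filter (fun i => c (pvF lst i))).map (pvF lst) := by
  unfold pvD
  rw [List.filter_map]
  rw [PySem.Dict.items_foldl_insert_fresh
        (((PySem.List.pyRange 0 lst.length 1).filter (c ∘ pvF lst)).map (pvF lst))
        Prod.fst Prod.snd PySem.Dict.empty
        (fun a _ => by simp [PySem.Dict.contains_empty])
        (by
          rw [List.map_map]
          have h1 : (Prod.fst ∘ pvF lst) = fun i => i := by funext i; simp [pvF]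
          rw [h1, List.map_id']
          exact (PySem.List.nodup_pyRange_one 0 (lst.length : Int)).filter _)]
  rw [List.map_map]
  rfl

lemma pvD_keys (lst : List (String × String)) (c : Int × (String × String) → Bool) :
    (pvD lst c).keys = (PySem.List.pyRange 0 lst.length 1).filter (fun i => c (pvF lst i)) := by
  show ((pvD lst c).items).map Prod.fst = _
  rw [pvD_items, List.map_map]
  have h1 : (Prod.fst ∘ pvF lst) = fun i => i := by funext i; simp [pvF]
  rw [h1, List.map_id']

lemma pvD_nodup (lst : List (String × String)) (c : Int × (String × String) → Bool) :
    (pvD lst c).keys.Nodup := by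
  rw [pvD_keys]
  exact (PySem.List.nodup_pyRange_one 0 (lst.length : Int)).filter _

lemma pvStarts_eq (lst : List (String × String)) (i : Int) (t : String) :
    pvStarts lst i t
      = (decide (0 ≤ i ∧ i < (lst.length : Int)) && pvTag t (pvF lst i)) := by
  simp [pvStarts, pvTag, pvF, Bool.and_assoc]

lemma pvD_contains (lst : List (String × String)) (c : Int × (String × String) → Bool) (k : Int) :
    (pvD lst c).contains k
      = (decide (0 ≤ k ∧ k < (lst.length : Int)) && c (pvF lst k)) := by
  rw [PySem.Dict.contains_eq_decide_mem_keys, pvD_keys]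
  by_cases hb : 0 ≤ k ∧ k < (lst.length : Int)
  · by_cases hc : c (pvF lst k) <;>
      simp [List.mem_filter, PySem.List.mem_pyRange_one, hb, hc]
  · simp [List.mem_filter, PySem.List.mem_pyRange_one, hb]

lemma pvD_getD (lst : List (String × String)) (c : Int × (String × String) → Bool) (k : Int)
    (h : (pvD lst c).contains k = true) :
    (pvD lst c).getD k ("", "") = pvAt lst k := by
  rw [pvD_contains] at h
  have hk : k ∈ (PySem.List.pyRange 0 lst.length 1).filter (fun i => c (pvF lst i)) := by
    simp only [Bool.and_eq_true, decide_eq_true_eq] at h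
    simp [List.mem_filter, PySem.List.mem_pyRange_one, h.1, h.2]
  have hm : (k, pvAt lst k) ∈ (pvD lst c).items := by
    rw [pvD_items]
    simpa [pvF] using List.mem_map_of_mem (f := pvF lst) hk
  exact PySem.Dict.getD_of_mem_items _ hm (pvD_nodup lst c) _

-- distinct single-character prefixes exclude one another
lemma pvCharsExcl {l : List Char} {c d : Char} (hcd : c ≠ d)
    (hc : PySem.Chars.startswith l [c] = true) : PySem.Chars.startswith l [d] = false := by
  rw [PySem.Chars.startswith_iff] at hc
  rcases hc with ⟨t, ht⟩
  rw [Bool.eq_false_iff]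
  intro hd
  rw [PySem.Chars.startswith_iff] at hd
  rcases hd with ⟨u, hu⟩
  rw [← ht] at hu
  simp at hu
  exact hcd hu.1.symm

lemma pvTag_chars (t : String) (kv : Int × (String × String)) :
    pvTag t kv = PySem.Chars.startswith kv.2.2.toList t.toList := by
  simp [pvTag]

lemma pvCV_eq (kv : Int × (String × String)) : pvCV kv = pvTag "V" kv := by
  by_cases hV : pvTag "V" kv = true
  · have hV' : PySem.Chars.startswith kv.2.2.toList ['V'] = true := by
      rw [pvTag_chars] at hV; exact hV
    have hJ : pvTag "J" kv = false := by
      rw [pvTag_chars]; exact pvCharsExcl (by decide) hV'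
    simp only [pvCV, hV, hJ, Bool.not_false, Bool.true_and]
  · have hV' : pvTag "V" kv = false := by
      cases h : pvTag "V" kv with
      | false => rfl
      | true => exact absurd h hV
    simp only [pvCV, hV', Bool.and_false]

lemma pvCN_eq (kv : Int × (String × String)) : pvCN kv = pvTag "N" kv := by
  by_cases hN : pvTag "N" kv = true
  · have hN' : PySem.Chars.startswith kv.2.2.toList ['N'] = true := by
      rw [pvTag_chars] at hN; exact hN
    have hJ : pvTag "J" kv = false := by
      rw [pvTag_chars]; exact pvCharsExcl (by decide) hN'
    have hV : pvTag "V" kv = false := by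
      rw [pvTag_chars]; exact pvCharsExcl (by decide) hN'
    simp only [pvCN, hN, hJ, hV, Bool.not_false, Bool.true_and]
  · have hN' : pvTag "N" kv = false := by
      cases h : pvTag "N" kv with
      | false => rfl
      | true => exact absurd h hN
    simp only [pvCN, hN', Bool.and_false]

lemma pvCR_eq (kv : Int × (String × String)) : pvCR kv = pvTag "R" kv := by
  by_cases hR : pvTag "R" kv = true
  · have hR' : PySem.Chars.startswith kv.2.2.toList ['R'] = true := by
      rw [pvTag_chars] at hR; exact hR
    have hJ : pvTag "J" kv = false := by
      rw [pvTag_chars]; exact pvCharsExcl (by decide) hR'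
    have hV : pvTag "V" kv = false := by
      rw [pvTag_chars]; exact pvCharsExcl (by decide) hR'
    have hN : pvTag "N" kv = false := by
      rw [pvTag_chars]; exact pvCharsExcl (by decide) hR'
    simp only [pvCR, hR, hJ, hV, hN, Bool.not_false, Bool.true_and]
  · have hR' : pvTag "R" kv = false := by
      cases h : pvTag "R" kv with
      | false => rfl
      | true => exact absurd h hR
    simp only [pvCR, hR', Bool.and_false]

lemma pvD_congr (lst : List (String × String)) {c c' : Int × (String × String) → Bool}
    (h : ∀ kv, c kv = c' kv) : pvD lst c = pvD lst c' := by
  unfold pvD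
  rw [List.filter_congr (fun x _ => h x)]

lemma pvContains_tag (lst : List (String × String)) (t : String) (k : Int) :
    (pvD lst (pvTag t)).contains k = pvStarts lst k t := by
  rw [pvD_contains, pvStarts_eq]

-- the pass loops as filterMaps over the iterated items
lemma pvPass1_eq1 (jd nd : PySem.Dict Int (String × String)) (bs : List Int)
    (acc : List (String × String)) :
    pvPass1 jd nd bs acc
      = acc ++ nd.items.filterMap (fun kv => pvTryB (fun b =>
          if jd.contains (kv.1 - b) then
            some ((jd.getD (kv.1 - b) ("", "")).1, (nd.getD kv.1 ("", "")).1)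
          else if jd.contains (kv.1 + b) then
            some ((jd.getD (kv.1 + b) ("", "")).1, (nd.getD kv.1 ("", "")).1)
          else none) bs) := by
  unfold pvPass1
  exact pvFoldlOptAppend (fun kv => pvTryB (fun b =>
    if jd.contains (kv.1 - b) then
      some ((jd.getD (kv.1 - b) ("", "")).1, (nd.getD kv.1 ("", "")).1)
    else if jd.contains (kv.1 + b) then
      some ((jd.getD (kv.1 + b) ("", "")).1, (nd.getD kv.1 ("", "")).1)
    else none) bs) nd.items acc

lemma pvPassPrev_eq1 (look base : PySem.Dict Int (String × String)) (bs : List Int)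
    (acc : List (String × String)) :
    pvPassPrev look base bs acc
      = acc ++ base.items.filterMap (fun kv => pvTryB (fun b =>
          if look.contains (kv.1 - b) then
            some ((look.getD (kv.1 - b) ("", "")).1, (base.getD kv.1 ("", "")).1)
          else none) bs) := by
  unfold pvPassPrev
  exact pvFoldlOptAppend (fun kv => pvTryB (fun b =>
    if look.contains (kv.1 - b) then
      some ((look.getD (kv.1 - b) ("", "")).1, (base.getD kv.1 ("", "")).1)
    else none) bs) base.items acc

-- B's noun loop as a filterMap
lemma pvAltNouns_eq (lst : List (String × String)) (l : List Int) (acc : List (String × String)) :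
    l.foldl (fun acc i =>
        if pvStarts lst i "N" then
          if pvStarts lst (i - 1) "J" then acc ++ [((pvAt lst (i - 1)).1, (pvAt lst i).1)]
          else if pvStarts lst (i + 1) "J" then acc ++ [((pvAt lst (i + 1)).1, (pvAt lst i).1)]
          else acc
        else acc) acc
      = acc ++ l.filterMap (fun i =>
          if pvStarts lst i "N" then
            if pvStarts lst (i - 1) "J" then some ((pvAt lst (i - 1)).1, (pvAt lst i).1)
            else if pvStarts lst (i + 1) "J" then some ((pvAt lst (i + 1)).1, (pvAt lst i).1)
            else none
          else none) := by
  induction l generalizing acc with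
  | nil => simp
  | cons x xs ih =>
    simp only [List.foldl_cons, List.filterMap_cons]
    by_cases h1 : pvStarts lst x "N" <;>
    by_cases h2 : pvStarts lst (x - 1) "J" <;>
    by_cases h3 : pvStarts lst (x + 1) "J" <;>
      simp [h1, h2, h3, ih]

-- pointwise agreement of the four columns
lemma pvPt1 (lst : List (String × String)) (i : Int)
    (hb : 0 ≤ i ∧ i < (lst.length : Int)) :
    (if pvTag "N" (pvF lst i) then
        pvTryB (fun b =>
          if (pvD lst (pvTag "J")).contains (i - b) then
            some (((pvD lst (pvTag "J")).getD (i - b) ("", "")).1,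
                  ((pvD lst (pvTag "N")).getD i ("", "")).1)
          else if (pvD lst (pvTag "J")).contains (i + b) then
            some (((pvD lst (pvTag "J")).getD (i + b) ("", "")).1,
                  ((pvD lst (pvTag "N")).getD i ("", "")).1)
          else none) [1]
      else none)
    = (if pvStarts lst i "N" then
        if pvStarts lst (i - 1) "J" then some ((pvAt lst (i - 1)).1, (pvAt lst i).1)
        else if pvStarts lst (i + 1) "J" then some ((pvAt lst (i + 1)).1, (pvAt lst i).1)
        else none
      else none) := by
  rw [pvTryB_singleton]
  have hS : pvStarts lst i "N" = pvTag "N" (pvF lst i) := by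
    rw [pvStarts_eq]; simp [hb]
  rw [hS]
  by_cases hN : pvTag "N" (pvF lst i)
  · simp only [hN, if_true]
    have hNd : (pvD lst (pvTag "N")).getD i ("", "") = pvAt lst i := by
      apply pvD_getD
      rw [pvD_contains]
      simp [hb, hN]
    rw [pvContains_tag, pvContains_tag]
    by_cases h1 : pvStarts lst (i - 1) "J"
    · have hg : (pvD lst (pvTag "J")).getD (i - 1) ("", "") = pvAt lst (i - 1) := by
        apply pvD_getD; rw [pvContains_tag]; exact h1
      simp [h1, hg, hNd]
    · by_cases h2 : pvStarts lst (i + 1) "J"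
      · have hg : (pvD lst (pvTag "J")).getD (i + 1) ("", "") = pvAt lst (i + 1) := by
          apply pvD_getD; rw [pvContains_tag]; exact h2
        simp [h1, h2, hg, hNd]
      · simp [h1, h2]
  · simp [hN]

lemma pvPtPrev (lst : List (String × String)) (tl tb : String) (i : Int)
    (hb : 0 ≤ i ∧ i < (lst.length : Int)) :
    (if pvTag tb (pvF lst i) then
        pvTryB (fun b =>
          if (pvD lst (pvTag tl)).contains (i - b) then
            some (((pvD lst (pvTag tl)).getD (i - b) ("", "")).1,
                  ((pvD lst (pvTag tb)).getD i ("", "")).1)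
          else none) [1]
      else none)
    = (if pvStarts lst i tb && pvStarts lst (i - 1) tl then
        some ((pvAt lst (i - 1)).1, (pvAt lst i).1)
      else none) := by
  rw [pvTryB_singleton]
  have hS : pvStarts lst i tb = pvTag tb (pvF lst i) := by
    rw [pvStarts_eq]; simp [hb]
  rw [hS, pvContains_tag]
  by_cases hB : pvTag tb (pvF lst i)
  · have hBd : (pvD lst (pvTag tb)).getD i ("", "") = pvAt lst i := by
      apply pvD_getD
      rw [pvD_contains]
      simp [hb, hB]
    by_cases h1 : pvStarts lst (i - 1) tl
    · have hg : (pvD lst (pvTag tl)).getD (i - 1) ("", "") = pvAt lst (i - 1) := by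
        apply pvD_getD; rw [pvContains_tag]; exact h1
      simp [hB, h1, hg, hBd]
    · simp [hB, h1]
  · simp [hB]

-- ===== VERDICT (by name: the statement is the Claim_ definition above) =====
theorem getSentiPhrase_allpos_spec : Claim_equal_getSentiPhrase_allpos := by
  intro lst _
  unfold Spec_getSentiPhrase_allpos
  show getSentiPhrase_allpos lst = getSentiPhrase_allpos_alt lst
  simp only [getSentiPhrase_allpos, getSentiPhrase_allpos_alt]
  simp only [pvClassify_eq, pvD_congr lst pvCV_eq, pvD_congr lst pvCN_eq, pvD_congr lst pvCR_eq]
  rw [PySem.List.pyRange_one_singleton]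
  rw [show PySem.List.pyRange 1 2 1 = ([1] : List Int) from by decide]
  rw [pvPass1_eq1, pvPassPrev_eq1, pvPassPrev_eq1, pvPassPrev_eq1]
  simp only [pvD_items, List.filterMap_map, List.filterMap_filter]
  rw [pvAltNouns_eq]
  simp only [pvPairs, List.nil_append, List.append_assoc]
  congr 1
  · exact List.filterMap_congr (fun i hi =>
      pvPt1 lst i (PySem.List.mem_pyRange_one.mp hi))
  congr 1
  · exact List.filterMap_congr (fun i hi =>
      pvPtPrev lst "R" "V" i (PySem.List.mem_pyRange_one.mp hi))
  congr 1
  · exact List.filterMap_congr (fun i hi =>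
      pvPtPrev lst "R" "J" i (PySem.List.mem_pyRange_one.mp hi))
  · exact List.filterMap_congr (fun i hi =>
      pvPtPrev lst "V" "J" i (PySem.List.mem_pyRange_one.mp hi))
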